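-- pv_equiv track=rewrite | github.com/mofni/pyrad | src/pyrad_proc/pyrad/io/read_data_mxpol.py | convert_polvar_name
-- ===== SOURCE A (Python) =====
-- def convert_polvar_name(convention, polvar):
--     """
--     Finds the correct variable name for a given convention (MXPOL, MCH) and
--     a given variable name which was spelled with a different case or
--     according to a different convention. For example, MXPOL convention uses
--     'Z' for the reflectivity variable, but if a user inserted 'Zh' this
--     function will convert it to 'Z'.
--
--     Parameters
--     ----------
--     convention : str, destination convention; either MCH or LTE
--
--     polvar : str, key of polarimetric variable to be converted
--
--     Returns
--     -------
--     mykey : str, polarimertric variable key as used within the ProfileLab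
--         toolbox context
--
--     """
--     # Generate dictionary for the conversion
--
--     metranet = ['ZH','ZV','ZDR','PHI','VEL','WID', 'RHO','CLUT', 'MPH','STA1', 'STA2', 'WBN']
--     MCH = ['Z','ZV','ZDR','PHIDP','V','W','RHO','CLUT', 'MPH','STA1', 'STA2', 'WBN']
--     LTE = ['Zh','Zv','Zdr','Phidp','RVel','Sw','Rhohv','Clut', 'mph','sta1', 'sta2', 'wbn']
--
--
--     convertkeys = {}
--     convertkeys['MCH'] = {}
--     convertkeys['LTE'] = {}
--     convertkeys['metranet'] = {}
--
--     for i in range(0,len(MCH)):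
--         convertkeys['MCH'][MCH[i]] = [LTE[i], metranet[i]]
--
--     convertkeys['LTE'] = {}
--     for i in range(0,len(LTE)):
--         convertkeys['LTE'][LTE[i]] = [MCH[i], metranet[i]]
--
--     for i in range(0,len(metranet)):
--         convertkeys['metranet'][metranet[i]] = [MCH[i], LTE[i]]
--
--     # translate between conventions
--     mykey = polvar
--
--     for key, value in convertkeys[convention].items():
--         if polvar in value:
--             mykey = key
--             break
--
--     return mykey
-- ===== SOURCE B (Python) =====
-- def convert_polvar_name(convention, polvar):
--     metranet = ['ZH', 'ZV', 'ZDR', 'PHI', 'VEL', 'WID', 'RHO', 'CLUT', 'MPH', 'STA1', 'STA2', 'WBN']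
--     MCH = ['Z', 'ZV', 'ZDR', 'PHIDP', 'V', 'W', 'RHO', 'CLUT', 'MPH', 'STA1', 'STA2', 'WBN']
--     LTE = ['Zh', 'Zv', 'Zdr', 'Phidp', 'RVel', 'Sw', 'Rhohv', 'Clut', 'mph', 'sta1', 'sta2', 'wbn']
--     # canonical list per convention, with the two other conventions' parallel lists
--     canon, alt1, alt2 = {'MCH': (MCH, LTE, metranet),
--                          'LTE': (LTE, MCH, metranet),
--                          'metranet': (metranet, MCH, LTE)}[convention]
--     # inverted index: every alternate spelling -> canonical key
--     index = {}
--     for c, a1, a2 in zip(canon, alt1, alt2):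
--         index[a1] = c
--         index[a2] = c
--     return index.get(polvar, polvar)
-- ===== Notes on version B (the rewrite author's own statement) =====
-- stated objective: simpler
-- what changed: Replaces A's three key->[alt1,alt2] dicts plus a linear scan over the chosen dict's value lists with a single inverted alternate->canonical index built once, answered by one dict lookup with the original name as default.
import Mathlib
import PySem

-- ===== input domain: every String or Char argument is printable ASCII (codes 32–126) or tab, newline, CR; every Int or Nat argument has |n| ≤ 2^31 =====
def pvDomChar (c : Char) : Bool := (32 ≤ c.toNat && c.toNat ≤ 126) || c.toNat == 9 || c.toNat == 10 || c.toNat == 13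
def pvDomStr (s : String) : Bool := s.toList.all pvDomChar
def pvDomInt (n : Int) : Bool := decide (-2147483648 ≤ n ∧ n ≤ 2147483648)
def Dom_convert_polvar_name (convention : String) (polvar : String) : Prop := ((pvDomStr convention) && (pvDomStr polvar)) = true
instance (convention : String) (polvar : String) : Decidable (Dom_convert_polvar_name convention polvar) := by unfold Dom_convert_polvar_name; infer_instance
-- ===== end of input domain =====

-- B replaces A's three key->[alt1,alt2] dicts and value-list scan with one inverted
-- alternate->canonical index for the chosen convention and a single lookup (objective: simpler).

-- ===== PORT A =====
-- the 'for key, value in ...: if polvar in value: mykey = key; break' loop of A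
def pvScanA (polvar : String) : List (String × List String) → String
  | [] => polvar
  | (k, v) :: rest => if polvar ∈ v then k else pvScanA polvar rest

def convert_polvar_name (convention : String) (polvar : String) : String :=
  let metranet : List String := ["ZH","ZV","ZDR","PHI","VEL","WID","RHO","CLUT","MPH","STA1","STA2","WBN"]
  let MCH : List String := ["Z","ZV","ZDR","PHIDP","V","W","RHO","CLUT","MPH","STA1","STA2","WBN"]
  let LTE : List String := ["Zh","Zv","Zdr","Phidp","RVel","Sw","Rhohv","Clut","mph","sta1","sta2","wbn"]
  let convertkeys : PySem.Dict String (PySem.Dict String (List String)) :=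
    ((PySem.Dict.empty.insert "MCH" PySem.Dict.empty).insert "LTE" PySem.Dict.empty).insert "metranet" PySem.Dict.empty
  let convertkeys := (PySem.List.pyRange 0 (MCH.length : Int) 1).foldl (fun d i =>
      d.modify "MCH" PySem.Dict.empty (fun inner => inner.insert (PySem.List.pyGetD MCH i "") [PySem.List.pyGetD LTE i "", PySem.List.pyGetD metranet i ""])) convertkeys
  let convertkeys := convertkeys.insert "LTE" PySem.Dict.empty
  let convertkeys := (PySem.List.pyRange 0 (LTE.length : Int) 1).foldl (fun d i =>
      d.modify "LTE" PySem.Dict.empty (fun inner => inner.insert (PySem.List.pyGetD LTE i "") [PySem.List.pyGetD MCH i "", PySem.List.pyGetD metranet i ""])) convertkeys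
  let convertkeys := (PySem.List.pyRange 0 (metranet.length : Int) 1).foldl (fun d i =>
      d.modify "metranet" PySem.Dict.empty (fun inner => inner.insert (PySem.List.pyGetD metranet i "") [PySem.List.pyGetD MCH i "", PySem.List.pyGetD LTE i ""])) convertkeys
  match convertkeys.get? convention with
  | none => polvar   -- Python raises KeyError here; excluded by Pre_
  | some d => pvScanA polvar d.items

-- ===== PORT B =====
def convert_polvar_name_alt (convention : String) (polvar : String) : String :=
  let metranet : List String := ["ZH","ZV","ZDR","PHI","VEL","WID","RHO","CLUT","MPH","STA1","STA2","WBN"]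
  let MCH : List String := ["Z","ZV","ZDR","PHIDP","V","W","RHO","CLUT","MPH","STA1","STA2","WBN"]
  let LTE : List String := ["Zh","Zv","Zdr","Phidp","RVel","Sw","Rhohv","Clut","mph","sta1","sta2","wbn"]
  let table : PySem.Dict String (List String × List String × List String) :=
    ((PySem.Dict.empty.insert "MCH" (MCH, LTE, metranet)).insert "LTE" (LTE, MCH, metranet)).insert "metranet" (metranet, MCH, LTE)
  match table.get? convention with
  | none => polvar   -- Python raises KeyError here; excluded by Pre_
  | some (canon, alt1, alt2) =>
      let index : PySem.Dict String String := (canon.zip (alt1.zip alt2)).foldl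
        (fun d p => (d.insert p.2.1 p.1).insert p.2.2 p.1) PySem.Dict.empty
      index.getD polvar polvar

-- ===== PRECONDITION & SPEC =====
-- Pre_ excludes unknown conventions, on which A (and B) raise KeyError.
def Pre_convert_polvar_name (convention : String) (polvar : String) : Prop :=
  convention = "MCH" ∨ convention = "LTE" ∨ convention = "metranet"
instance (convention : String) (polvar : String) : Decidable (Pre_convert_polvar_name convention polvar) := by unfold Pre_convert_polvar_name; infer_instance

def pvWitness_convert_polvar_name : String × String := ("MCH", "Zh")

def Spec_convert_polvar_name (convention : String) (polvar : String) (out : String) : Prop := out = convert_polvar_name_alt convention polvar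
instance (convention : String) (polvar : String) (out : String) : Decidable (Spec_convert_polvar_name convention polvar out) := by unfold Spec_convert_polvar_name; infer_instance

-- ===== CLAIM (what is proved, stated in full; the proofs are below) =====
def Claim_equal_convert_polvar_name : Prop := ∀ (convention : String) (polvar : String), Dom_convert_polvar_name convention polvar → Pre_convert_polvar_name convention polvar → Spec_convert_polvar_name convention polvar (convert_polvar_name convention polvar)

-- ===== LEMMAS AND PROOFS =====
set_option maxRecDepth 4000

lemma pvAgree_MCH (p : String) : convert_polvar_name "MCH" p = convert_polvar_name_alt "MCH" p := by
  have hA : convert_polvar_name "MCH" p = pvScanA p [("Z", ["Zh", "ZH"]), ("ZV", ["Zv", "ZV"]), ("ZDR", ["Zdr", "ZDR"]), ("PHIDP", ["Phidp", "PHI"]), ("V", ["RVel", "VEL"]), ("W", ["Sw", "WID"]), ("RHO", ["Rhohv", "RHO"]), ("CLUT", ["Clut", "CLUT"]), ("MPH", ["mph", "MPH"]), ("STA1", ["sta1", "STA1"]), ("STA2", ["sta2", "STA2"]), ("WBN", ["wbn", "WBN"])] := rfl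
  have hB : convert_polvar_name_alt "MCH" p = (PySem.Dict.mk [("Zh", "Z"), ("ZH", "Z"), ("Zv", "ZV"), ("ZV", "ZV"), ("Zdr", "ZDR"), ("ZDR", "ZDR"), ("Phidp", "PHIDP"), ("PHI", "PHIDP"), ("RVel", "V"), ("VEL", "V"), ("Sw", "W"), ("WID", "W"), ("Rhohv", "RHO"), ("RHO", "RHO"), ("Clut", "CLUT"), ("CLUT", "CLUT"), ("mph", "MPH"), ("MPH", "MPH"), ("sta1", "STA1"), ("STA1", "STA1"), ("sta2", "STA2"), ("STA2", "STA2"), ("wbn", "WBN"), ("WBN", "WBN")]).getD p p := rfl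
  rw [hA, hB]
  by_cases h0 : p = "Zh"
  · subst h0; rfl
  by_cases h1 : p = "ZH"
  · subst h1; rfl
  by_cases h2 : p = "Zv"
  · subst h2; rfl
  by_cases h3 : p = "ZV"
  · subst h3; rfl
  by_cases h4 : p = "Zdr"
  · subst h4; rfl
  by_cases h5 : p = "ZDR"
  · subst h5; rfl
  by_cases h6 : p = "Phidp"
  · subst h6; rfl
  by_cases h7 : p = "PHI"
  · subst h7; rfl
  by_cases h8 : p = "RVel"
  · subst h8; rfl
  by_cases h9 : p = "VEL"
  · subst h9; rfl
  by_cases h10 : p = "Sw"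
  · subst h10; rfl
  by_cases h11 : p = "WID"
  · subst h11; rfl
  by_cases h12 : p = "Rhohv"
  · subst h12; rfl
  by_cases h13 : p = "RHO"
  · subst h13; rfl
  by_cases h14 : p = "Clut"
  · subst h14; rfl
  by_cases h15 : p = "CLUT"
  · subst h15; rfl
  by_cases h16 : p = "mph"
  · subst h16; rfl
  by_cases h17 : p = "MPH"
  · subst h17; rfl
  by_cases h18 : p = "sta1"
  · subst h18; rfl
  by_cases h19 : p = "STA1"
  · subst h19; rfl
  by_cases h20 : p = "sta2"
  · subst h20; rfl
  by_cases h21 : p = "STA2"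
  · subst h21; rfl
  by_cases h22 : p = "wbn"
  · subst h22; rfl
  by_cases h23 : p = "WBN"
  · subst h23; rfl
  simp [pvScanA, PySem.Dict.getD_eq_get?_getD, PySem.Dict.get?, Option.getD, h0, h1, h2, h3, h4, h5, h6, h7, h8, h9, h10, h11, h12, h13, h14, h15, h16, h17, h18, h19, h20, h21, h22, h23, Ne.symm h0, Ne.symm h1, Ne.symm h2, Ne.symm h3, Ne.symm h4, Ne.symm h5, Ne.symm h6, Ne.symm h7, Ne.symm h8, Ne.symm h9, Ne.symm h10, Ne.symm h11, Ne.symm h12, Ne.symm h13, Ne.symm h14, Ne.symm h15, Ne.symm h16, Ne.symm h17, Ne.symm h18, Ne.symm h19, Ne.symm h20, Ne.symm h21, Ne.symm h22, Ne.symm h23]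

lemma pvAgree_LTE (p : String) : convert_polvar_name "LTE" p = convert_polvar_name_alt "LTE" p := by
  have hA : convert_polvar_name "LTE" p = pvScanA p [("Zh", ["Z", "ZH"]), ("Zv", ["ZV", "ZV"]), ("Zdr", ["ZDR", "ZDR"]), ("Phidp", ["PHIDP", "PHI"]), ("RVel", ["V", "VEL"]), ("Sw", ["W", "WID"]), ("Rhohv", ["RHO", "RHO"]), ("Clut", ["CLUT", "CLUT"]), ("mph", ["MPH", "MPH"]), ("sta1", ["STA1", "STA1"]), ("sta2", ["STA2", "STA2"]), ("wbn", ["WBN", "WBN"])] := rfl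
  have hB : convert_polvar_name_alt "LTE" p = (PySem.Dict.mk [("Z", "Zh"), ("ZH", "Zh"), ("ZV", "Zv"), ("ZDR", "Zdr"), ("PHIDP", "Phidp"), ("PHI", "Phidp"), ("V", "RVel"), ("VEL", "RVel"), ("W", "Sw"), ("WID", "Sw"), ("RHO", "Rhohv"), ("CLUT", "Clut"), ("MPH", "mph"), ("STA1", "sta1"), ("STA2", "sta2"), ("WBN", "wbn")]).getD p p := rfl
  rw [hA, hB]
  by_cases h0 : p = "Z"
  · subst h0; rfl
  by_cases h1 : p = "ZH"
  · subst h1; rfl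
  by_cases h2 : p = "ZV"
  · subst h2; rfl
  by_cases h3 : p = "ZDR"
  · subst h3; rfl
  by_cases h4 : p = "PHIDP"
  · subst h4; rfl
  by_cases h5 : p = "PHI"
  · subst h5; rfl
  by_cases h6 : p = "V"
  · subst h6; rfl
  by_cases h7 : p = "VEL"
  · subst h7; rfl
  by_cases h8 : p = "W"
  · subst h8; rfl
  by_cases h9 : p = "WID"
  · subst h9; rfl
  by_cases h10 : p = "RHO"
  · subst h10; rfl
  by_cases h11 : p = "CLUT"
  · subst h11; rfl
  by_cases h12 : p = "MPH"
  · subst h12; rfl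
  by_cases h13 : p = "STA1"
  · subst h13; rfl
  by_cases h14 : p = "STA2"
  · subst h14; rfl
  by_cases h15 : p = "WBN"
  · subst h15; rfl
  simp [pvScanA, PySem.Dict.getD_eq_get?_getD, PySem.Dict.get?, Option.getD, h0, h1, h2, h3, h4, h5, h6, h7, h8, h9, h10, h11, h12, h13, h14, h15, Ne.symm h0, Ne.symm h1, Ne.symm h2, Ne.symm h3, Ne.symm h4, Ne.symm h5, Ne.symm h6, Ne.symm h7, Ne.symm h8, Ne.symm h9, Ne.symm h10, Ne.symm h11, Ne.symm h12, Ne.symm h13, Ne.symm h14, Ne.symm h15]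

lemma pvAgree_metranet (p : String) : convert_polvar_name "metranet" p = convert_polvar_name_alt "metranet" p := by
  have hA : convert_polvar_name "metranet" p = pvScanA p [("ZH", ["Z", "Zh"]), ("ZV", ["ZV", "Zv"]), ("ZDR", ["ZDR", "Zdr"]), ("PHI", ["PHIDP", "Phidp"]), ("VEL", ["V", "RVel"]), ("WID", ["W", "Sw"]), ("RHO", ["RHO", "Rhohv"]), ("CLUT", ["CLUT", "Clut"]), ("MPH", ["MPH", "mph"]), ("STA1", ["STA1", "sta1"]), ("STA2", ["STA2", "sta2"]), ("WBN", ["WBN", "wbn"])] := rfl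
  have hB : convert_polvar_name_alt "metranet" p = (PySem.Dict.mk [("Z", "ZH"), ("Zh", "ZH"), ("ZV", "ZV"), ("Zv", "ZV"), ("ZDR", "ZDR"), ("Zdr", "ZDR"), ("PHIDP", "PHI"), ("Phidp", "PHI"), ("V", "VEL"), ("RVel", "VEL"), ("W", "WID"), ("Sw", "WID"), ("RHO", "RHO"), ("Rhohv", "RHO"), ("CLUT", "CLUT"), ("Clut", "CLUT"), ("MPH", "MPH"), ("mph", "MPH"), ("STA1", "STA1"), ("sta1", "STA1"), ("STA2", "STA2"), ("sta2", "STA2"), ("WBN", "WBN"), ("wbn", "WBN")]).getD p p := rfl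
  rw [hA, hB]
  by_cases h0 : p = "Z"
  · subst h0; rfl
  by_cases h1 : p = "Zh"
  · subst h1; rfl
  by_cases h2 : p = "ZV"
  · subst h2; rfl
  by_cases h3 : p = "Zv"
  · subst h3; rfl
  by_cases h4 : p = "ZDR"
  · subst h4; rfl
  by_cases h5 : p = "Zdr"
  · subst h5; rfl
  by_cases h6 : p = "PHIDP"
  · subst h6; rfl
  by_cases h7 : p = "Phidp"
  · subst h7; rfl
  by_cases h8 : p = "V"
  · subst h8; rfl
  by_cases h9 : p = "RVel"
  · subst h9; rfl
  by_cases h10 : p = "W"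
  · subst h10; rfl
  by_cases h11 : p = "Sw"
  · subst h11; rfl
  by_cases h12 : p = "RHO"
  · subst h12; rfl
  by_cases h13 : p = "Rhohv"
  · subst h13; rfl
  by_cases h14 : p = "CLUT"
  · subst h14; rfl
  by_cases h15 : p = "Clut"
  · subst h15; rfl
  by_cases h16 : p = "MPH"
  · subst h16; rfl
  by_cases h17 : p = "mph"
  · subst h17; rfl
  by_cases h18 : p = "STA1"
  · subst h18; rfl
  by_cases h19 : p = "sta1"
  · subst h19; rfl
  by_cases h20 : p = "STA2"
  · subst h20; rfl
  by_cases h21 : p = "sta2"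
  · subst h21; rfl
  by_cases h22 : p = "WBN"
  · subst h22; rfl
  by_cases h23 : p = "wbn"
  · subst h23; rfl
  simp [pvScanA, PySem.Dict.getD_eq_get?_getD, PySem.Dict.get?, Option.getD, h0, h1, h2, h3, h4, h5, h6, h7, h8, h9, h10, h11, h12, h13, h14, h15, h16, h17, h18, h19, h20, h21, h22, h23, Ne.symm h0, Ne.symm h1, Ne.symm h2, Ne.symm h3, Ne.symm h4, Ne.symm h5, Ne.symm h6, Ne.symm h7, Ne.symm h8, Ne.symm h9, Ne.symm h10, Ne.symm h11, Ne.symm h12, Ne.symm h13, Ne.symm h14, Ne.symm h15, Ne.symm h16, Ne.symm h17, Ne.symm h18, Ne.symm h19, Ne.symm h20, Ne.symm h21, Ne.symm h22, Ne.symm h23]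

-- ===== VERDICT (by name: the statement is the Claim_ definition above) =====
theorem convert_polvar_name_spec : Claim_equal_convert_polvar_name := by
  intro convention polvar _ pre
  unfold Spec_convert_polvar_name
  rcases pre with h | h | h <;> subst h
  · exact pvAgree_MCH polvar
  · exact pvAgree_LTE polvar
  · exact pvAgree_metranet polvar
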